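-- pv_equiv track=rewrite | github.com/SamPease/BARSElo | train/diagnostics/run_trueskill_diagnostics.py | find_team_players
-- ===== SOURCE A (Python) =====
-- def find_team_players(team_to_players, team_name):
--     # direct match
--     if team_name in team_to_players:
--         return team_to_players[team_name]
--     # try case-insensitive
--     lower = {k.lower(): k for k in team_to_players}
--     if team_name.lower() in lower:
--         return team_to_players[lower[team_name.lower()]]
--     # try fuzzy: strip punctuation and whitespace
--     key = ''.join(c.lower() for c in team_name if c.isalnum() or c.isspace()).strip()
--     for k in team_to_players:
--         k2 = ''.join(c.lower() for c in k if c.isalnum() or c.isspace()).strip()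
--         if k2 == key:
--             return team_to_players[k]
--     return []
-- ===== SOURCE B (Python) =====
-- def find_team_players(team_to_players, team_name):
--     def norm(s):
--         return ''.join(c.lower() for c in s if c.isalnum() or c.isspace()).strip()
--
--     lower_name = team_name.lower()
--     norm_name = norm(team_name)
--     ci = None      # case-insensitive candidate: last key whose .lower() matches
--     fuzzy = None   # fuzzy candidate: first key whose normalization matches
--     for k, v in team_to_players.items():
--         if k == team_name:
--             return v
--         if k.lower() == lower_name:
--             ci = v
--         if fuzzy is None and norm(k) == norm_name:
--             fuzzy = v
--     if ci is not None:
--         return ci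
--     if fuzzy is not None:
--         return fuzzy
--     return []
-- ===== Notes on version B (the rewrite author's own statement) =====
-- stated objective: alternative
-- what changed: Replaces A's three staged passes (dict membership, a lowered-key index dict rebuilt then re-looked-up, then a fuzzy scan) by one pass over items() that keeps an exact early return, a last-wins case-insensitive candidate and a first-wins fuzzy candidate, resolved by priority after the loop.
import Mathlib
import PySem

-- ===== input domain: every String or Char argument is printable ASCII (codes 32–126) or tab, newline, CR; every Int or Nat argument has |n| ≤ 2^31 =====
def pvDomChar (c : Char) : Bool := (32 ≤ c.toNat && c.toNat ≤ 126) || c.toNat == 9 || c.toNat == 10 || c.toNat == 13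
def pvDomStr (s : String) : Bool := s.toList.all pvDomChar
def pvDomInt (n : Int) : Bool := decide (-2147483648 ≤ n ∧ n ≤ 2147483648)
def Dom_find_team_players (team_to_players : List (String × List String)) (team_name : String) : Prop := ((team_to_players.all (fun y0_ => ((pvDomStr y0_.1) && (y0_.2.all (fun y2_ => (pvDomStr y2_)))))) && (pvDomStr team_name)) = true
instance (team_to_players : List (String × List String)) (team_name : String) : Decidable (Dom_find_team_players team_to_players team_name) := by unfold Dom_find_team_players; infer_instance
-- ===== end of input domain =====

-- B replaces A's three staged passes by one pass keeping exact / case-insensitive / fuzzy candidates (alternative decomposition, same cost).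

-- shared normalization helper: ''.join(c.lower() for c in s if c.isalnum() or c.isspace()).strip()
def pvNorm (s : String) : String :=
  PySem.Str.strip (String.mk ((s.toList.filter (fun c => PySem.Chars.isalnum c || PySem.Chars.isspace c)).map PySem.Chars.lowerChar))

-- ===== PORT A =====
-- the fuzzy 'for k in team_to_players: … return team_to_players[k]' loop
-- (team_to_players[k] is ported as (List.lookup k …).getD []; exact, since k is taken from the dict's own keys)
def pvFuzzyLoop (team_to_players : List (String × List String)) (key : String) : List (String × List String) → List String
  | [] => []
  | (k, _) :: rest =>
      if pvNorm k == key then (List.lookup k team_to_players).getD []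
      else pvFuzzyLoop team_to_players key rest

def find_team_players (team_to_players : List (String × List String)) (team_name : String) : List String :=
  match List.lookup team_name team_to_players with
  | some v => v
  | none =>
    let lower := team_to_players.foldl (fun d p => d.insert (PySem.Str.lower p.1) p.1) PySem.Dict.empty
    match lower.get? (PySem.Str.lower team_name) with
    | some k => (List.lookup k team_to_players).getD []
    | none => pvFuzzyLoop team_to_players (pvNorm team_name) team_to_players

-- ===== PORT B =====
-- single pass: exact early return, last-wins case-insensitive candidate, first-wins fuzzy candidate
def pvScan (team_name lowName normName : String) :
    List (String × List String) → Option (List String) → Option (List String) → List String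
  | [], ci, fuzzy =>
      match ci with
      | some v => v
      | none => match fuzzy with
                | some v => v
                | none => []
  | (k, v) :: rest, ci, fuzzy =>
      if k == team_name then v
      else pvScan team_name lowName normName rest
        (if PySem.Str.lower k == lowName then some v else ci)
        (if fuzzy.isNone && (pvNorm k == normName) then some v else fuzzy)

def find_team_players_alt (team_to_players : List (String × List String)) (team_name : String) : List String :=
  pvScan team_name (PySem.Str.lower team_name) (pvNorm team_name) team_to_players none none

-- ===== PRECONDITION & SPEC =====
-- Pre_ requires pairwise-distinct keys: the Python argument is a dict, which cannot carry duplicate keys,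
-- so an association list with duplicated first components represents no Python input at all.
def Pre_find_team_players (team_to_players : List (String × List String)) (team_name : String) : Prop :=
  (team_to_players.map Prod.fst).Nodup

instance (team_to_players : List (String × List String)) (team_name : String) : Decidable (Pre_find_team_players team_to_players team_name) := by unfold Pre_find_team_players; infer_instance

def pvWitness_find_team_players : (List (String × List String)) × String :=
  ([("Red Team", ["alice", "bob"]), ("Blue", ["carol"])], "red  team!")

def Spec_find_team_players (team_to_players : List (String × List String)) (team_name : String) (out : List String) : Prop := out = find_team_players_alt team_to_players team_name
instance (team_to_players : List (String × List String)) (team_name : String) (out : List String) : Decidable (Spec_find_team_players team_to_players team_name out) := by unfold Spec_find_team_players; infer_instance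

-- ===== CLAIM (what is proved, stated in full; the proofs are below) =====
def Claim_equal_find_team_players : Prop := ∀ (team_to_players : List (String × List String)) (team_name : String), Dom_find_team_players team_to_players team_name → Pre_find_team_players team_to_players team_name → Spec_find_team_players team_to_players team_name (find_team_players team_to_players team_name)

-- ===== LEMMAS AND PROOFS =====

-- candidate extractors used by the proofs only
def pvLastCi (lowName : String) (tps : List (String × List String)) : Option (List String) :=
  (tps.reverse.find? (fun p => PySem.Str.lower p.1 == lowName)).map (·.2)

def pvFirstFz (normName : String) (tps : List (String × List String)) : Option (List String) :=
  (tps.find? (fun p => pvNorm p.1 == normName)).map (·.2)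

theorem pv_lookup_of_mem {tps : List (String × List String)} {p : String × List String}
    (hnd : (tps.map Prod.fst).Nodup) (hmem : p ∈ tps) : List.lookup p.1 tps = some p.2 := by
  induction tps with
  | nil => cases hmem
  | cons q rest ih =>
    simp only [List.map_cons, List.nodup_cons] at hnd
    rcases List.mem_cons.mp hmem with h | h
    · subst h
      simp [List.lookup]
    · have hne : q.1 ≠ p.1 := by
        intro he
        exact hnd.1 (he ▸ List.mem_map_of_mem h)
      simp only [List.lookup]
      rw [show (p.1 == q.1) = false from beq_false_of_ne (fun he => hne he.symm)]
      exact ih hnd.2 h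

theorem pv_scan_eq (team_name lowName normName : String)
    (tps : List (String × List String)) (ci fz : Option (List String)) :
    pvScan team_name lowName normName tps ci fz =
      match List.lookup team_name tps with
      | some v => v
      | none =>
        match (pvLastCi lowName tps).or ci with
        | some v => v
        | none =>
          match fz.or (pvFirstFz normName tps) with
          | some v => v
          | none => [] := by
  induction tps generalizing ci fz with
  | nil => cases ci <;> cases fz <;> simp [pvScan, pvLastCi, pvFirstFz]
  | cons p rest ih =>
    obtain ⟨k, v⟩ := p
    by_cases hk : k = team_name
    · subst hk
      simp [pvScan, List.lookup]
    · have hbeq : (k == team_name) = false := beq_false_of_ne hk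
      have hbeq' : (team_name == k) = false := beq_false_of_ne (fun h => hk h.symm)
      simp only [pvScan, hbeq, if_false, ih, List.lookup, hbeq']
      cases hl : List.lookup team_name rest with
      | some w => rfl
      | none =>
        simp only [pvLastCi, pvFirstFz, List.reverse_cons, List.find?_append, Option.map_or,
          List.find?_cons]
        by_cases hci : PySem.Str.lower k = lowName
        · simp only [hci, beq_self_eq_true, List.find?_nil, if_true]
          cases rest.reverse.find? (fun p => PySem.Str.lower p.1 == lowName) <;>
            cases ci <;> simp
        · have : (PySem.Str.lower k == lowName) = false := beq_false_of_ne hci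
          simp only [this, List.find?_nil, if_false, cond_false]
          cases hrc : rest.reverse.find? (fun p => PySem.Str.lower p.1 == lowName) with
          | some q => simp
          | none =>
            simp only [Option.map_none, Option.or_none, Option.none_or]
            cases ci with
            | some w => rfl
            | none =>
              by_cases hfz : pvNorm k = normName
              · simp only [hfz, beq_self_eq_true, if_true, cond_true, Bool.and_true]
                cases fz <;> simp
              · have : (pvNorm k == normName) = false := beq_false_of_ne hfz
                simp [this]

theorem pv_lower_dict_get (q : String) (tps : List (String × List String))
    (d : PySem.Dict String String) :
    (tps.foldl (fun d p => d.insert (PySem.Str.lower p.1) p.1) d).get? q =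
      ((tps.reverse.find? (fun p => PySem.Str.lower p.1 == q)).map (·.1)).or (d.get? q) := by
  induction tps generalizing d with
  | nil => simp
  | cons p rest ih =>
    simp only [List.foldl_cons, ih, List.reverse_cons, List.find?_append, List.find?_cons,
      Option.map_or]
    by_cases h : PySem.Str.lower p.1 = q
    · simp only [h, beq_self_eq_true, List.find?_nil, if_true]
      rw [PySem.Dict.get?_insert, if_pos rfl]
      cases rest.reverse.find? (fun p => PySem.Str.lower p.1 == q) <;> simp
    · have hb : (PySem.Str.lower p.1 == q) = false := beq_false_of_ne h
      simp only [hb, List.find?_nil, if_false, cond_false]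
      rw [PySem.Dict.get?_insert, if_neg (fun he => h he.symm)]
      simp [Option.or_assoc]

theorem pv_fuzzy_loop_eq (tps : List (String × List String)) (key : String)
    (l : List (String × List String)) :
    pvFuzzyLoop tps key l =
      match l.find? (fun p => pvNorm p.1 == key) with
      | some p => (List.lookup p.1 tps).getD []
      | none => [] := by
  induction l with
  | nil => rfl
  | cons p rest ih =>
    obtain ⟨k, v⟩ := p
    simp only [pvFuzzyLoop, List.find?_cons]
    by_cases h : pvNorm k = key
    · simp [h]
    · have hb : (pvNorm k == key) = false := beq_false_of_ne h
      simp [hb, ih]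

-- ===== VERDICT (by name: the statement is the Claim_ definition above) =====
theorem find_team_players_spec : Claim_equal_find_team_players := by
  intro tps name _ hpre
  unfold Spec_find_team_players find_team_players find_team_players_alt
  rw [pv_scan_eq]
  cases hl : List.lookup name tps with
  | some v => rfl
  | none =>
    simp only
    rw [pv_lower_dict_get]
    simp only [PySem.Dict.get?_empty, Option.or_none, pvLastCi]
    cases hc : tps.reverse.find? (fun p => PySem.Str.lower p.1 == PySem.Str.lower name) with
    | some p =>
      have hmem : p ∈ tps := List.mem_reverse.mp (List.mem_of_find?_eq_some hc)
      simp [pv_lookup_of_mem hpre hmem]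
    | none =>
      simp only [Option.map_none, Option.none_or, pvFirstFz]
      rw [pv_fuzzy_loop_eq]
      cases hf : tps.find? (fun p => pvNorm p.1 == pvNorm name) with
      | some p =>
        have hmem : p ∈ tps := List.mem_of_find?_eq_some hf
        simp [pv_lookup_of_mem hpre hmem]
      | none => simp
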